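-- pv_equiv track=rewrite | github.com/AL-JR/Bioinformatics | ML_research/untitled0.py | solution
-- ===== SOURCE A (Python) =====
-- def solution(S, K):
--     # write your code in Python 3.6
--     mod_S = ''.join(S.upper().split('-'))
--     mod_S_len = len(mod_S)
--     new_S = ''
--
--     if mod_S_len > K:
--
--         right = K
--         left = 0
--
--         while right <= mod_S_len:
--
--             string_chunk = mod_S[left:right]
--
--
--             if right >= mod_S_len:
--                 new_S += mod_S[left:mod_S_len]
--             else:
--                 new_S += string_chunk + '-'
--             right  += K
--             left += K
--         new_S += mod_S[left:mod_S_len]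
--     else:
--         new_S = mod_S
--
--     return new_S
-- ===== SOURCE B (Python) =====
-- def solution(S, K):
--     cleaned = ''.join(S.upper().split('-'))
--     pieces = []
--     for i, c in enumerate(cleaned):
--         if i > 0 and i % K == 0:
--             pieces.append('-')
--         pieces.append(c)
--     return ''.join(pieces)
-- ===== Notes on version B (the rewrite author's own statement) =====
-- stated objective: idiomatic
-- what changed: B walks the cleaned string once character-by-character with enumerate, inserting '-' by an index-modulo test, instead of A's while loop over left/right slice bounds with chunk slicing and conditional tail appends.
import Mathlib
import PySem

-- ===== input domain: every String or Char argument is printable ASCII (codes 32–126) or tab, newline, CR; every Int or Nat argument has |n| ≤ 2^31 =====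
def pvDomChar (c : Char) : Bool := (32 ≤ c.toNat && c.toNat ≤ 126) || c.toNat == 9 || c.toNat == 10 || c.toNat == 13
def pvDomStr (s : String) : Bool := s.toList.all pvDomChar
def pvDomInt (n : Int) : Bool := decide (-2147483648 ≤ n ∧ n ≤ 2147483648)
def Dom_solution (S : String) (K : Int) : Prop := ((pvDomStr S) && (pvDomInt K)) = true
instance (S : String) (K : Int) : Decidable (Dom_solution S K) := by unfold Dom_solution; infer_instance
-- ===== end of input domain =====

-- B rewrites A's while-loop over slice bounds as a single enumerate pass inserting '-' by an index-modulo test (idiomatic; same O(n) cost).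

-- ===== PORT A =====
-- the while loop: state (left, right, new_S); fuel = len(mod_S)+1 bounds the iterations
-- (for K ≥ 1 the loop runs at most len(mod_S) times, so the fuel guard never fires inside Pre_)
def solutionLoop (mod_S : List Char) (K : Int) :
    Nat → Int → Int → List Char → (List Char × Int)
  | 0, left, _, acc => (acc, left)
  | fuel + 1, left, right, acc =>
    if right ≤ PySem.List.len mod_S then
      -- chunk = mod_S[left:right]; new_S grows by the tail slice or by chunk + '-'
      solutionLoop mod_S K fuel (left + K) (right + K)
        (if PySem.List.len mod_S ≤ right then
            acc ++ PySem.List.slice mod_S (some left) (some (PySem.List.len mod_S))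
          else acc ++ PySem.List.slice mod_S (some left) (some right) ++ ['-'])
    else (acc, left)

-- mod_S = ''.join(S.upper().split('-')); for mod_S_len > K run the loop then append mod_S[left:mod_S_len]
def solution (S : String) (K : Int) : String :=
  if K < PySem.List.len (PySem.Chars.join [] (PySem.Chars.splitOn (PySem.Chars.upper S.toList) ['-'])) then
    String.ofList
      ((solutionLoop (PySem.Chars.join [] (PySem.Chars.splitOn (PySem.Chars.upper S.toList) ['-'])) K
          ((PySem.Chars.join [] (PySem.Chars.splitOn (PySem.Chars.upper S.toList) ['-'])).length + 1) 0 K []).1 ++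
        PySem.List.slice (PySem.Chars.join [] (PySem.Chars.splitOn (PySem.Chars.upper S.toList) ['-']))
          (some (solutionLoop (PySem.Chars.join [] (PySem.Chars.splitOn (PySem.Chars.upper S.toList) ['-'])) K
            ((PySem.Chars.join [] (PySem.Chars.splitOn (PySem.Chars.upper S.toList) ['-'])).length + 1) 0 K []).2)
          (some (PySem.List.len (PySem.Chars.join [] (PySem.Chars.splitOn (PySem.Chars.upper S.toList) ['-'])))))
  else String.ofList (PySem.Chars.join [] (PySem.Chars.splitOn (PySem.Chars.upper S.toList) ['-']))

-- ===== PORT B =====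
-- cleaned = ''.join(S.upper().split('-')); one pass, '-' inserted where 0 < i and i % K == 0
def solution_alt (S : String) (K : Int) : String :=
  String.ofList
    ((PySem.List.enumerate (PySem.Chars.join [] (PySem.Chars.splitOn (PySem.Chars.upper S.toList) ['-']))).foldl
      (fun acc ic =>
        (if 0 < ic.1 ∧ PySem.Int.mod ic.1 K = 0 then acc ++ ['-'] else acc) ++ [ic.2]) [])

-- ===== PRECONDITION & SPEC =====
-- Pre_ excludes K ≤ 0 except the one corner where A still returns: for K ≤ 0 A's while
-- loop never terminates unless the cleaned string is empty (S all dashes, K = 0), and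
-- B's modulo test raises ZeroDivisionError for K = 0 on a nonempty cleaned string.
def Pre_solution (S : String) (K : Int) : Prop :=
  1 ≤ K ∨ (K = 0 ∧ S.toList.all (fun c => c = '-') = true)
instance (S : String) (K : Int) : Decidable (Pre_solution S K) := by unfold Pre_solution; infer_instance
def pvWitness_solution : String × Int := ("2-4A0r7-4k", 4)

def Spec_solution (S : String) (K : Int) (out : String) : Prop := out = solution_alt S K
instance (S : String) (K : Int) (out : String) : Decidable (Spec_solution S K out) := by unfold Spec_solution; infer_instance

-- ===== CLAIM (what is proved, stated in full; the proofs are below) =====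
def Claim_equal_solution : Prop := ∀ (S : String) (K : Int), Dom_solution S K → Pre_solution S K → Spec_solution S K (solution S K)

-- ===== LEMMAS AND PROOFS =====

-- the common value both programs compute: l regrouped into k-chunks joined by '-'
def pvChunks (k : Nat) (l : List Char) : List Char :=
  if _h : l.length ≤ k ∨ k = 0 then l
  else l.take k ++ '-' :: pvChunks k (l.drop k)
termination_by l.length
decreasing_by simp_all; omega

theorem pvChunks_of_le {k : Nat} {l : List Char} (h : l.length ≤ k) : pvChunks k l = l := by
  rw [pvChunks]; simp [h]

theorem pvChunks_of_gt {k : Nat} {l : List Char} (h : k < l.length) (hk : 1 ≤ k) :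
    pvChunks k l = l.take k ++ '-' :: pvChunks k (l.drop k) := by
  rw [pvChunks, dif_neg (by omega)]

-- ---- A side: the loop produces the chunked suffix ----

theorem solutionLoop_spec (mod_S : List Char) (K : Int) (hk : 1 ≤ K) :
    ∀ (fuel : Nat) (left : Nat) (acc : List Char),
      left ≤ mod_S.length →
      mod_S.length - left ≤ fuel * K.toNat →
      (solutionLoop mod_S K fuel (left : Int) ((left : Int) + K) acc).1 ++
        PySem.List.slice mod_S (some (solutionLoop mod_S K fuel (left : Int) ((left : Int) + K) acc).2)
          (some (PySem.List.len mod_S))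
      = acc ++ pvChunks K.toNat (mod_S.drop left) := by
  intro fuel
  have hKcast : ((K.toNat : Int)) = K := by omega
  have hk1 : 1 ≤ K.toNat := by omega
  induction fuel with
  | zero =>
    intro left acc hle hfuel
    have hnil : mod_S.drop left = [] := by
      apply List.eq_nil_of_length_eq_zero; simp; omega
    simp [solutionLoop, hnil, PySem.List.len_eq, PySem.List.slice_natCast, pvChunks_of_le,
      List.drop_eq_nil_iff.mp hnil]
  | succ fuel ih =>
    intro left acc hle hfuel
    have hmul : (fuel + 1) * K.toNat = fuel * K.toNat + K.toNat := by ring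
    rw [solutionLoop]
    by_cases hcont : (left : Int) + K ≤ PySem.List.len mod_S
    · rw [if_pos hcont]
      have hlk : left + K.toNat ≤ mod_S.length := by
        simp [PySem.List.len_eq] at hcont; omega
      have hcast : (left : Int) + K = ((left + K.toNat : Nat) : Int) := by push_cast; omega
      rw [hcast]
      by_cases hend : PySem.List.len mod_S ≤ ((left + K.toNat : Nat) : Int)
      · -- length = left + k : last full chunk, loop exits on the next test
        have hlen : mod_S.length = left + K.toNat := by
          simp [PySem.List.len_eq] at hcont hend; omega
        rw [if_pos hend, ih (left + K.toNat) _ hlk (by omega)]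
        have hdrop2 : mod_S.drop (left + K.toNat) = [] := by
          apply List.eq_nil_of_length_eq_zero; simp; omega
        rw [hdrop2, pvChunks_of_le (by simp),
          pvChunks_of_le (by rw [List.length_drop, hlen]; omega)]
        simp only [PySem.List.len_eq, PySem.List.slice_natCast]
        rw [List.take_of_length_le (by simp)]
        simp
      · -- a middle chunk: append chunk + '-' and continue
        rw [if_neg hend, ih (left + K.toNat) _ hlk (by omega)]
        have hgt : K.toNat < (mod_S.drop left).length := by
          simp [PySem.List.len_eq] at hend; simp; omega
        conv => rhs; rw [pvChunks_of_gt hgt hk1]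
        rw [List.drop_drop]
        have hchunk : PySem.List.slice mod_S (some (left : Int)) (some ((left + K.toNat : Nat) : Int)) =
            (mod_S.drop left).take K.toNat := by
          rw [(by push_cast; ring : ((left + K.toNat : Nat) : Int) = ((left : Nat) : Int) + ((K.toNat : Nat) : Int)),
            PySem.List.slice_natCast_add]
        rw [hchunk]
        simp
    · rw [if_neg hcont]
      have hlt : (mod_S.drop left).length ≤ K.toNat := by
        simp [PySem.List.len_eq] at hcont; simp; omega
      rw [pvChunks_of_le hlt]
      simp only [PySem.List.len_eq, PySem.List.slice_natCast]
      rw [List.take_of_length_le (by simp)]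

-- ---- B side: the fold is a flatMap; the flatMap is the chunking ----

-- the per-character piece B appends
def pvPiece (K : Int) (ic : Int × Char) : List Char :=
  (if 0 < ic.1 ∧ PySem.Int.mod ic.1 K = 0 then ['-'] else []) ++ [ic.2]

theorem pvFlat_no_dash (K : Int) :
    ∀ (m : List Char) (s : Int),
      (∀ j : Nat, j < m.length → ¬ (0 < s + j ∧ PySem.Int.mod (s + j) K = 0)) →
      (PySem.List.enumerate m s).flatMap (pvPiece K) = m := by
  intro m
  induction m with
  | nil => intro s _; simp [PySem.List.enumerate_nil]
  | cons x t ih =>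
    intro s hno
    rw [PySem.List.enumerate_cons]
    have h0 := hno 0 (by simp)
    simp only [List.flatMap_cons]
    rw [ih (s + 1) (fun j hj => by
      have := hno (j + 1) (by simp; omega)
      push_cast at this ⊢
      convert this using 3 <;> ring_nf)]
    simp [pvPiece, (by simpa using h0 : ¬ (0 < s ∧ PySem.Int.mod s K = 0))]

-- one k-block whose start index is a positive multiple of K: a dash, then the block verbatim
theorem pvFlat_block (K : Int) (hk : 1 ≤ K) (m : List Char) (c : Nat) (hc : 1 ≤ c)
    (hne : m ≠ []) (hlen : m.length ≤ K.toNat) :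
    (PySem.List.enumerate m ((c : Int) * K)).flatMap (pvPiece K) = '-' :: m := by
  obtain ⟨x, t, rfl⟩ := List.exists_cons_of_ne_nil hne
  rw [PySem.List.enumerate_cons]
  simp only [List.flatMap_cons]
  have hdvd : PySem.Int.mod ((c : Int) * K) K = 0 :=
    (PySem.Int.mod_eq_zero_iff_dvd _ _).mpr ⟨c, mul_comm _ _⟩
  have hpos : 0 < (c : Int) * K := by positivity
  rw [pvFlat_no_dash K t ((c : Int) * K + 1) (fun j hj => by
    rintro ⟨-, hmod⟩
    have hdj : K ∣ ((c : Int) * K + (1 + j)) := by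
      have h := (PySem.Int.mod_eq_zero_iff_dvd _ _).mp hmod
      have : (c : Int) * K + 1 + j = (c : Int) * K + (1 + j) := by ring
      rwa [this] at h
    have hdj' : K ∣ ((1 : Int) + j) := (Int.dvd_add_right ⟨c, mul_comm _ _⟩).mp hdj
    have hle' : K ≤ 1 + j := Int.le_of_dvd (by omega) hdj'
    simp at hj hlen; omega)]
  simp [pvPiece, hdvd, hpos]

theorem pvFlat_pos (K : Int) (hk : 1 ≤ K) :
    ∀ (n : Nat) (m : List Char) (c : Nat), m.length ≤ n → 1 ≤ c → m ≠ [] →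
      (PySem.List.enumerate m ((c : Int) * K)).flatMap (pvPiece K) = '-' :: pvChunks K.toNat m := by
  intro n
  have hk1 : 1 ≤ K.toNat := by omega
  induction n with
  | zero => intro m c hn _ hne; simp at hn; simp [hn] at hne
  | succ n ih =>
    intro m c hn hc hne
    by_cases hsmall : m.length ≤ K.toNat
    · rw [pvFlat_block K hk m c hc hne hsmall, pvChunks_of_le hsmall]
    · have htk : (m.take K.toNat).length = K.toNat := by simp; omega
      have hdne : m.drop K.toNat ≠ [] := by
        rw [Ne, List.drop_eq_nil_iff]; omega
      have hdlen : (m.drop K.toNat).length ≤ n := by simp; omega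
      rw [← List.take_append_drop K.toNat m, PySem.List.enumerate_append, List.flatMap_append]
      rw [List.take_append_drop]
      rw [pvFlat_block K hk (m.take K.toNat) c hc
        (by intro h; rw [h] at htk; simp at htk; omega) (le_of_eq htk)]
      have hcast : (c : Int) * K + ((m.take K.toNat).length : Int) = (((c + 1 : Nat)) : Int) * K := by
        rw [htk]; push_cast; rw [hKcast']; ring
      rw [hcast, ih (m.drop K.toNat) (c + 1) hdlen (by omega) hdne]
      conv => rhs; rw [pvChunks_of_gt (by omega) hk1]
      simp
  where hKcast' : ((K.toNat : Int)) = K := by omega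

theorem pvFlat_zero (K : Int) (hk : 1 ≤ K) (l : List Char) :
    (PySem.List.enumerate l 0).flatMap (pvPiece K) = pvChunks K.toNat l := by
  have hk1 : 1 ≤ K.toNat := by omega
  by_cases hsmall : l.length ≤ K.toNat
  · rw [pvChunks_of_le hsmall]
    apply pvFlat_no_dash K l 0
    rintro j hj ⟨hpos, hmod⟩
    have hdj : K ∣ ((0 : Int) + j) := (PySem.Int.mod_eq_zero_iff_dvd _ _).mp hmod
    have := Int.le_of_dvd (by omega) hdj
    omega
  · have htk : (l.take K.toNat).length = K.toNat := by simp; omega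
    have hdne : l.drop K.toNat ≠ [] := by
      rw [Ne, List.drop_eq_nil_iff]; omega
    rw [← List.take_append_drop K.toNat l, PySem.List.enumerate_append, List.flatMap_append]
    rw [List.take_append_drop]
    rw [pvFlat_no_dash K (l.take K.toNat) 0 (fun j hj => by
      rintro ⟨hpos, hmod⟩
      have hdj : K ∣ ((0 : Int) + j) := (PySem.Int.mod_eq_zero_iff_dvd _ _).mp hmod
      have := Int.le_of_dvd (by omega) hdj
      rw [htk] at hj; omega)]
    have hcast : (0 : Int) + ((l.take K.toNat).length : Int) = ((1 : Nat) : Int) * K := by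
      rw [htk]; push_cast; omega
    rw [hcast, pvFlat_pos K hk (l.drop K.toNat).length (l.drop K.toNat) 1 le_rfl le_rfl hdne]
    conv => rhs; rw [pvChunks_of_gt (by omega) hk1]

theorem solution_alt_eq (S : String) (K : Int) (hk : 1 ≤ K) :
    solution_alt S K = String.ofList (pvChunks K.toNat
      (PySem.Chars.join [] (PySem.Chars.splitOn (PySem.Chars.upper S.toList) ['-']))) := by
  unfold solution_alt
  rw [show (fun (acc : List Char) (ic : Int × Char) =>
      (if 0 < ic.1 ∧ PySem.Int.mod ic.1 K = 0 then acc ++ ['-'] else acc) ++ [ic.2])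
      = fun acc ic => acc ++ pvPiece K ic by
    funext acc ic; simp only [pvPiece]; split_ifs <;> simp]
  rw [PySem.List.foldl_append_eq_flatMap, pvFlat_zero K hk]
  simp

-- ---- the K = 0 corner Pre_ admits: an all-dash S cleans to the empty string ----

theorem pvJoinEmpty : ∀ (parts : List (List Char)), (∀ p ∈ parts, p = []) →
    PySem.Chars.join [] parts = [] := by
  intro parts h
  induction parts with
  | nil => simp [PySem.Chars.join_nil]
  | cons a t ih =>
    cases t with
    | nil => simpa [PySem.Chars.join_singleton] using h a (by simp)
    | cons b r =>
      rw [PySem.Chars.join_cons_cons, h a (by simp), ih (fun p hp => h p (by simp [hp]))]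
      simp

theorem pvGoDash : ∀ (fuel : Nat) (l : List Char) (acc : List (List Char)),
    l.length < fuel → (∀ c ∈ l, c = '-') → (∀ p ∈ acc, p = []) →
    PySem.Chars.join [] (PySem.Chars.splitOn.go ['-'] fuel l [] acc) = [] := by
  intro fuel
  induction fuel with
  | zero => intro l acc h; exact absurd h (by omega)
  | succ fuel ih =>
    intro l acc hlen hdash hacc
    cases l with
    | nil =>
      rw [PySem.Chars.splitOn.go]
      · apply pvJoinEmpty
        intro p hp
        simp at hp
        rcases hp with h | h
        · exact hacc p h
        · simp [h]
      · omega
    | cons c rest =>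
      rw [PySem.Chars.splitOn.go]
      have hc : c = '-' := hdash c (by simp)
      have hpre : List.isPrefixOf ['-'] (c :: rest) = true := by simp [hc, List.isPrefixOf]
      rw [if_pos hpre]
      simp only [List.length_cons, List.drop_succ_cons]
      exact ih rest _ (by simp at hlen ⊢; omega) (fun x hx => hdash x (by simp [hx]))
        (fun p hp => by simp at hp; rcases hp with h | h; exacts [by simp [h], hacc p h])

theorem pvCleanDash (S : String) (hS : S.toList.all (fun c => c = '-') = true) :
    PySem.Chars.join [] (PySem.Chars.splitOn (PySem.Chars.upper S.toList) ['-']) = [] := by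
  rw [PySem.Chars.splitOn]
  apply pvGoDash _ _ _ (by simp [PySem.Chars.upper]) _ (by simp)
  intro c hc
  simp [PySem.Chars.upper] at hc
  obtain ⟨x, hx, rfl⟩ := hc
  have : x = '-' := by simp [List.all_eq_true] at hS; exact hS x hx
  rw [this]; decide

-- ===== VERDICT (by name: the statement is the Claim_ definition above) =====
theorem solution_spec : Claim_equal_solution := by
  intro S K _hdom hpre
  rcases hpre with hk | ⟨rfl, hdash⟩
  case inr =>
    -- K = 0: the cleaned string is empty and both sides return ""
    unfold Spec_solution solution solution_alt
    rw [pvCleanDash S hdash]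
    simp [PySem.List.enumerate_nil, PySem.List.len_eq]
  have hk1 : 1 ≤ K.toNat := by omega
  unfold Spec_solution
  rw [solution_alt_eq S K hk]
  unfold solution
  set l := PySem.Chars.join [] (PySem.Chars.splitOn (PySem.Chars.upper S.toList) ['-']) with hl
  by_cases hbig : K < PySem.List.len l
  · rw [if_pos hbig]
    have hfuel : l.length - 0 ≤ (l.length + 1) * K.toNat := by
      have := Nat.le_mul_of_pos_right (l.length + 1) (by omega : 0 < K.toNat)
      omega
    have hmain := solutionLoop_spec l K hk (l.length + 1) 0 [] (by omega) hfuel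
    rw [(by norm_num : (((0 : Nat)) : Int) = (0 : Int))] at hmain
    simp only [zero_add, List.drop_zero, List.nil_append] at hmain
    rw [hmain]
  · rw [if_neg hbig]
    rw [pvChunks_of_le (by simp [PySem.List.len_eq] at hbig; omega)]
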